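-- pv_equiv track=rewrite | github.com/arrobaraujo/riob.us | src/logic/gtfs_static_logic.py | _resolve_requested_route_short_names
-- ===== SOURCE A (Python) =====
-- def _normalize_line_key(value):
--     """Normaliza identificador de linha para matching resiliente.
--
--     Ex.: "0415" e "415" passam a casar.
--     """
--     if value is None:
--         return ""
--     text = str(value).strip()
--     if not text:
--         return ""
--     if text.isdigit():
--         return str(int(text))
--     return text.upper()
--
-- def _resolve_requested_route_short_names(requested_lines, all_route_names):
--     """Resolve linhas solicitadas para route_short_name existentes no GTFS."""
--     requested = [str(v).strip() for v in (requested_lines or []) if str(v).strip()]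
--     if not requested:
--         return set()
--
--     all_names = [str(v).strip() for v in all_route_names if str(v).strip()]
--     all_name_set = set(all_names)
--
--     direct_hits = {ln for ln in requested if ln in all_name_set}
--     unresolved = [ln for ln in requested if ln not in direct_hits]
--     if not unresolved:
--         return direct_hits
--
--     gtfs_by_norm = {}
--     for route_name in all_names:
--         gtfs_by_norm.setdefault(_normalize_line_key(route_name), set()).add(route_name)
--
--     resolved = set(direct_hits)
--     for ln in unresolved:
--         normalized = _normalize_line_key(ln)
--         resolved.update(gtfs_by_norm.get(normalized, set()))
--     return resolved
-- ===== SOURCE B (Python) =====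
-- def _normalize_line_key(value):
--     if value is None:
--         return ""
--     text = str(value).strip()
--     if not text:
--         return ""
--     if text.isdigit():
--         return str(int(text))
--     return text.upper()
--
-- def _resolve_requested_route_short_names(requested_lines, all_route_names):
--     """Resolve linhas solicitadas para route_short_name existentes no GTFS.
--
--     Explicit-loop variant: one cleaning helper, a single partition pass
--     splitting requests into hits/misses, then a per-miss corpus scan
--     (no set of names, no dict index keyed by normalized name)."""
--     def _clean(values):
--         out = []
--         for v in values:
--             t = str(v).strip()
--             if t:
--                 out.append(t)
--         return out
--
--     requested = _clean(requested_lines or [])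
--     if not requested:
--         return set()
--     all_names = _clean(all_route_names)
--     hits, misses = [], []
--     for ln in requested:
--         (hits if ln in all_names else misses).append(ln)
--     result = set(hits)
--     for ln in misses:
--         k = _normalize_line_key(ln)
--         result |= {n for n in all_names if _normalize_line_key(n) == k}
--     return result
-- ===== Notes on version B (the rewrite author's own statement) =====
-- stated objective: alternative
-- what changed: B replaces A's staged comprehensions and dict index (set of names, direct_hits set, unresolved list, setdefault-grouped buckets) with explicit loops: one cleaning helper, a single partition pass splitting requests into hits/misses via list membership, then a per-miss scan of the corpus filtering by normalized-key equality; no name set and no index are ever built.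
import Mathlib
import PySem

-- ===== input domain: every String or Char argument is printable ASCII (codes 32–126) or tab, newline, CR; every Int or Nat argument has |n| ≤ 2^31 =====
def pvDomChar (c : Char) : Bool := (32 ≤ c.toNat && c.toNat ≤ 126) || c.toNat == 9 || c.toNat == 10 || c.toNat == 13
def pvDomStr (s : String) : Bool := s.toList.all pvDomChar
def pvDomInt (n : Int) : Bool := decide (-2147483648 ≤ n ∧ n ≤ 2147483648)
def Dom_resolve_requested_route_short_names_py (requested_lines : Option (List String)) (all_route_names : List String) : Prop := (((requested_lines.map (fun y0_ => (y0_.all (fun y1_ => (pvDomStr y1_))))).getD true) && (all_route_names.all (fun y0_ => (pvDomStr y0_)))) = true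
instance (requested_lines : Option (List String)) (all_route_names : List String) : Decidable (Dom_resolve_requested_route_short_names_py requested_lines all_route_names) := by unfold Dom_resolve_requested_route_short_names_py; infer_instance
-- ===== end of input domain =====

-- B replaces A's staged comprehensions and dict index with explicit loops: one cleaning
-- helper, a single partition pass splitting requests into hits/misses, then a per-miss
-- corpus scan by normalized key — a different decomposition, not faster.
-- Both Pythons return a set; the ports build it in insertion order and the proof shows the lists equal.

-- ===== PORT A =====
-- _normalize_line_key; value is always a string at both call sites, so the None branch is dropped.
-- int(text) is guarded by text.isdigit(), so ofStr? always succeeds; .getD 0 only totalizes.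
def normalize_line_key (value : String) : String :=
  let text := PySem.Str.strip value
  if text = "" then ""
  else if PySem.Str.strIsdigit text then PySem.Int.toStr ((PySem.Int.ofStr? text).getD 0)
  else PySem.Str.upper text

def resolve_requested_route_short_names_py (requested_lines : Option (List String)) (all_route_names : List String) : List String :=
  let requested := ((requested_lines.getD []).map PySem.Str.strip).filter (fun s => s ≠ "")
  if requested = [] then []
  else
    let all_names := (all_route_names.map PySem.Str.strip).filter (fun s => s ≠ "")
    let all_name_set : PySem.Set String := PySem.Set.ofList all_names
    let direct_hits : PySem.Set String := PySem.Set.ofList (requested.filter (fun ln => PySem.Set.contains all_name_set ln))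
    let unresolved := requested.filter (fun ln => !PySem.Set.contains direct_hits ln)
    if unresolved = [] then direct_hits
    else
      let gtfs_by_norm := all_names.foldl (fun d n => PySem.Dict.modify d (normalize_line_key n) [] (fun s => PySem.Set.add s n)) PySem.Dict.empty
      unresolved.foldl (fun r ln => PySem.Set.update r (PySem.Dict.getD gtfs_by_norm (normalize_line_key ln) [])) direct_hits

-- ===== PORT B =====
-- the inner `_clean` loop of Source B
def pvClean : List String → List String
  | [] => []
  | v :: rest =>
    let t := PySem.Str.strip v
    if t = "" then pvClean rest else t :: pvClean rest

-- the partition loop: `(hits if ln in all_names else misses).append(ln)`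
def pvPartitionHits (all_names : List String) : List String → List String × List String
  | [] => ([], [])
  | ln :: rest =>
    let (h, m) := pvPartitionHits all_names rest
    if all_names.contains ln then (ln :: h, m) else (h, ln :: m)

-- the expansion loop: `result |= {n for n in all_names if _normalize_line_key(n) == k}`
def pvExpand (all_names : List String) (result : PySem.Set String) : List String → PySem.Set String
  | [] => result
  | ln :: rest =>
    let k := normalize_line_key ln
    pvExpand all_names (PySem.Set.update result (PySem.Set.ofList (all_names.filter (fun n => normalize_line_key n == k)))) rest

def resolve_requested_route_short_names_py_alt (requested_lines : Option (List String)) (all_route_names : List String) : List String :=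
  let requested := pvClean (requested_lines.getD [])
  if requested = [] then []
  else
    let all_names := pvClean all_route_names
    let (hits, misses) := pvPartitionHits all_names requested
    pvExpand all_names (PySem.Set.ofList hits) misses

-- ===== PRECONDITION & SPEC =====
def Spec_resolve_requested_route_short_names_py (requested_lines : Option (List String)) (all_route_names : List String) (out : List String) : Prop := out = resolve_requested_route_short_names_py_alt requested_lines all_route_names
instance (requested_lines : Option (List String)) (all_route_names : List String) (out : List String) : Decidable (Spec_resolve_requested_route_short_names_py requested_lines all_route_names out) := by unfold Spec_resolve_requested_route_short_names_py; infer_instance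

-- ===== CLAIM (what is proved, stated in full; the proofs are below) =====
def Claim_equal_resolve_requested_route_short_names_py : Prop := ∀ (requested_lines : Option (List String)) (all_route_names : List String), Dom_resolve_requested_route_short_names_py requested_lines all_route_names → Spec_resolve_requested_route_short_names_py requested_lines all_route_names (resolve_requested_route_short_names_py requested_lines all_route_names)

-- ===== LEMMAS AND PROOFS =====

theorem pvClean_eq (l : List String) :
    pvClean l = (l.map PySem.Str.strip).filter (fun s => s ≠ "") := by
  induction l with
  | nil => rfl
  | cons x xs ih =>
    simp only [pvClean, List.map_cons, List.filter_cons]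
    by_cases h : PySem.Str.strip x = "" <;> simp [h, ih]

theorem pvPartition_eq (all_names l : List String) :
    pvPartitionHits all_names l
      = (l.filter (fun ln => all_names.contains ln), l.filter (fun ln => !all_names.contains ln)) := by
  induction l with
  | nil => rfl
  | cons x xs ih =>
    simp only [pvPartitionHits, ih, List.filter_cons]
    by_cases h : x ∈ all_names <;> simp [h]

theorem pvExpand_eq_foldl (all_names l : List String) (r : PySem.Set String) :
    pvExpand all_names r l
      = l.foldl (fun r ln => PySem.Set.update r (PySem.Set.ofList (all_names.filter (fun n => normalize_line_key n == normalize_line_key ln)))) r := by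
  induction l generalizing r with
  | nil => rfl
  | cons x xs ih => simp only [pvExpand, List.foldl_cons, ih]

-- characterize the dict bucket: the names whose normalized key is k, in order, deduped
theorem getD_group_foldl (l : List String) (d : PySem.Dict String (List String)) (k : String) :
    PySem.Dict.getD (l.foldl (fun d n => PySem.Dict.modify d (normalize_line_key n) [] (fun s => PySem.Set.add s n)) d) k []
      = PySem.Set.update (PySem.Dict.getD d k []) (l.filter (fun n => normalize_line_key n == k)) := by
  induction l generalizing d with
  | nil => simp [PySem.Set.update]
  | cons x xs ih =>
    simp only [List.foldl_cons, List.filter_cons, ih, PySem.Dict.getD_modify]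
    by_cases h : normalize_line_key x = k
    · simp [h, PySem.Set.update]
    · simp [h, Ne.symm h]

-- membership in the Set of cleaned names agrees with Python's `ln in all_names` on the list
theorem contains_ofList_eq (xs : List String) (x : String) :
    PySem.Set.contains (PySem.Set.ofList xs) x = xs.contains x := by
  simp only [PySem.Set.contains_eq_listContains]
  by_cases h : x ∈ xs <;> simp [h, PySem.Set.mem_ofList]

-- membership in a filtered list, for elements of the list, is the predicate itself
theorem contains_filter_eq (l : List String) (p : String → Bool) (x : String) (hx : x ∈ l) :
    (l.filter p).contains x = p x := by
  have h1 : (l.filter p).contains x = decide (x ∈ l.filter p) := by simp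
  rw [h1]; simp [List.mem_filter, hx]

-- a request is unresolved iff it is not in the corpus (for requests in the requested list)
theorem filter_unresolved_eq (requested all_names : List String) :
    requested.filter (fun ln => !PySem.Set.contains (PySem.Set.ofList (requested.filter (fun ln => PySem.Set.contains (PySem.Set.ofList all_names) ln))) ln)
      = requested.filter (fun ln => !all_names.contains ln) := by
  apply List.filter_congr
  intro x hx
  rw [contains_ofList_eq, contains_filter_eq _ _ _ hx, contains_ofList_eq]

theorem resolve_requested_route_short_names_py_spec : Claim_equal_resolve_requested_route_short_names_py := by
  intro requested_lines all_route_names _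
  unfold Spec_resolve_requested_route_short_names_py
  unfold resolve_requested_route_short_names_py resolve_requested_route_short_names_py_alt
  simp only [pvClean_eq, pvPartition_eq]
  set requested := (((requested_lines.getD []).map PySem.Str.strip).filter (fun s => s ≠ "")) with hreq
  by_cases h : requested = []
  · simp [h]
  · simp only [if_neg h]
    set all_names := ((all_route_names.map PySem.Str.strip).filter (fun s => s ≠ "")) with hall
    have hhits : requested.filter (fun ln => PySem.Set.contains (PySem.Set.ofList all_names) ln)
        = requested.filter (fun ln => all_names.contains ln) := by
      apply List.filter_congr; intro x _; rw [contains_ofList_eq]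
    rw [filter_unresolved_eq, pvExpand_eq_foldl, hhits]
    have hbucket : (fun (r : PySem.Set String) ln => PySem.Set.update r (PySem.Dict.getD
        (all_names.foldl (fun d n => PySem.Dict.modify d (normalize_line_key n) [] (fun s => PySem.Set.add s n)) PySem.Dict.empty)
        (normalize_line_key ln) []))
        = (fun (r : PySem.Set String) ln => PySem.Set.update r (PySem.Set.ofList (all_names.filter (fun n => normalize_line_key n == normalize_line_key ln)))) := by
      funext r ln
      rw [getD_group_foldl, PySem.Dict.getD_empty, PySem.Set.update_nil_left]
    rw [hbucket]
    split_ifs with h2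
    · rw [h2]; rfl
    · rfl

-- ===== VERDICT (by name: the statement is the Claim_ definition above) =====
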